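-- pv_equiv track=rewrite | github.com/ilo-lang/ilo | research/explorations/bench-realistic/nested-calls.py | bench
-- ===== SOURCE A (Python) =====
-- def addn(a, b):
--     return a + b
--
-- def muln(a, b):
--     return a * b
--
-- def compute(x, y):
--     a = muln(x, y)
--     b = addn(a, x)
--     return addn(b, y)
--
-- def bench(n):
--     s = 0
--     i = 0
--     while i < n:
--         j = i + 1
--         s += compute(i, j)
--         i += 1
--     return s
-- ===== SOURCE B (Python) =====
-- def bench(n):
--     if n <= 0:
--         return 0
--     # sum_{i=0}^{n-1} (i*(i+1) + i + (i+1)) = sum i^2 + 3i + 1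
--     return n * (n - 1) * (2 * n - 1) // 6 + 3 * n * (n - 1) // 2 + n
-- ===== Notes on version B (the rewrite author's own statement) =====
-- stated objective: faster
-- what changed: Replaced the linear accumulation loop over compute with the closed-form polynomial summation (sum-of-squares plus arithmetic-series formulas), evaluated in constant time.
import Mathlib
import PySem

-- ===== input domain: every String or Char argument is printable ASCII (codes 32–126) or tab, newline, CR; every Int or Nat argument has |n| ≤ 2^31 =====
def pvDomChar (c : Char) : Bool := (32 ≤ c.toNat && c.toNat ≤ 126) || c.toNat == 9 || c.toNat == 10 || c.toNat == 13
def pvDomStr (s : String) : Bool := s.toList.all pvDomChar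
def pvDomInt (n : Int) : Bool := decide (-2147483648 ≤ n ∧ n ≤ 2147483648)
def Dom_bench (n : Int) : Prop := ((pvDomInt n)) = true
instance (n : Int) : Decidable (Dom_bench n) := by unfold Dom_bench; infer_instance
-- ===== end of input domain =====

-- B replaces A's O(n) accumulation loop with the closed-form polynomial sum (faster, asymptotic).


-- ===== PORT A =====
def addn (a b : Int) : Int := a + b

def muln (a b : Int) : Int := a * b

def compute (x y : Int) : Int :=
  let a := muln x y
  let b := addn a x
  addn b y

-- the while loop 'i = 0; while i < n: … i += 1' is ported as a fold over the ints 0,…,n-1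
def bench (n : Int) : Int :=
  (PySem.List.pyRange 0 n 1).foldl (fun s i => s + compute i (i + 1)) 0

-- ===== PORT B =====
def bench_alt (n : Int) : Int :=
  if n ≤ 0 then 0
  else PySem.Int.floordiv (n * (n - 1) * (2 * n - 1)) 6
       + PySem.Int.floordiv (3 * n * (n - 1)) 2 + n

-- ===== PRECONDITION & SPEC =====
def Spec_bench (n : Int) (out : Int) : Prop := out = bench_alt n
instance (n : Int) (out : Int) : Decidable (Spec_bench n out) := by unfold Spec_bench; infer_instance

-- ===== CLAIM (what is proved, stated in full; the proofs are below) =====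
def Claim_equal_bench : Prop := ∀ (n : Int), Dom_bench n → Spec_bench n (bench n)

-- ===== LEMMAS AND PROOFS =====

lemma bench_succ (m : Nat) :
    bench ((m : Int) + 1) = bench (m : Int) + compute (m : Int) ((m : Int) + 1) := by
  unfold bench
  rw [PySem.List.pyRange_one_succ_right (by exact_mod_cast Nat.zero_le m)]
  simp [List.foldl_append]

lemma cube_div (m : Nat) : (6 : Int) ∣ (m : Int) * ((m : Int) - 1) * (2 * (m : Int) - 1) := by
  induction m with
  | zero => decide
  | succ k ih =>
    obtain ⟨q, hq⟩ := ih
    exact ⟨q + (k : Int) ^ 2, by push_cast; ring_nf; ring_nf at hq; linarith⟩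

lemma sq_div (m : Nat) : (2 : Int) ∣ 3 * (m : Int) * ((m : Int) - 1) := by
  induction m with
  | zero => decide
  | succ k ih =>
    obtain ⟨q, hq⟩ := ih
    exact ⟨q + 3 * (k : Int), by push_cast; ring_nf; ring_nf at hq; linarith⟩

lemma bench_nat (m : Nat) : 6 * bench (m : Int) =
    (m : Int) * ((m : Int) - 1) * (2 * (m : Int) - 1) + 3 * (3 * (m : Int) * ((m : Int) - 1)) + 6 * (m : Int) := by
  induction m with
  | zero => decide
  | succ k ih =>
    have h := bench_succ k
    push_cast
    push_cast at ih h
    rw [h]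
    unfold compute addn muln
    ring_nf
    ring_nf at ih
    linarith

lemma floordiv_of_dvd (a q : Int) (b : Int) (hb : 0 < b) (h : a = b * q) :
    PySem.Int.floordiv a b = q := by
  rw [PySem.Int.floordiv_eq_ediv_of_pos hb, h, Int.mul_ediv_cancel_left _ (by omega)]

-- ===== VERDICT (by name: the statement is the Claim_ definition above) =====
theorem bench_spec : Claim_equal_bench := by
  intro n _
  unfold Spec_bench bench_alt
  by_cases hn : n ≤ 0
  · simp [hn, bench, PySem.List.pyRange_one_eq_nil hn]
  · rw [not_le] at hn
    have hcast : ((n.toNat : Int)) = n := Int.toNat_of_nonneg (le_of_lt hn)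
    obtain ⟨p, hp⟩ := cube_div n.toNat
    obtain ⟨q, hq⟩ := sq_div n.toNat
    have h6 := bench_nat n.toNat
    rw [hcast] at hp hq h6
    rw [if_neg (by omega), floordiv_of_dvd _ p _ (by norm_num) hp,
        floordiv_of_dvd _ q _ (by norm_num) hq]
    omega
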